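-- pv_equiv track=rewrite | github.com/JinZhou5042/graph_optimization | graph_generator.py | _reduction_internal_nodes_count
-- ===== SOURCE A (Python) =====
-- def _reduction_internal_nodes_count(n_leaves: int, fanin: int) -> int:
--     """
--     Number of internal aggregation nodes needed to reduce `n_leaves` to 1 using a k-ary tree
--     with arity `fanin`.
--
--     Example: n=10, fanin=1000 -> 1
--              n=1001, fanin=1000 -> 3  (2 + 1)
--     """
--     assert fanin >= 2
--     if n_leaves <= 1:
--         return 0
--     total = 0
--     n = n_leaves
--     while n > 1:
--         n = (n + fanin - 1) // fanin
--         total += n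
--     return total
-- ===== SOURCE B (Python) =====
-- def _reduction_internal_nodes_count(n_leaves: int, fanin: int) -> int:
--     """Closed form via base-fanin digits: the total of the ceiling-division
--     chain equals (m - digitsum_fanin(m)) // (fanin - 1) + numdigits_fanin(m)
--     for m = n_leaves - 1 (since sum of floor(m/fanin**j) telescopes to
--     (m - digitsum(m)) / (fanin - 1) and each ceil term is floor + 1)."""
--     assert fanin >= 2
--     if n_leaves <= 1:
--         return 0
--     m = n_leaves - 1
--     digit_sum = 0
--     n_digits = 0
--     while m > 0:
--         m, d = divmod(m, fanin)
--         digit_sum += d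
--         n_digits += 1
--     return (n_leaves - 1 - digit_sum) // (fanin - 1) + n_digits
-- ===== Notes on version B (the rewrite author's own statement) =====
-- stated objective: alternative
-- what changed: B replaces A's summation of successive ceiling-divided level sizes by a closed form: it computes the base-fanin digit sum and digit count of n_leaves-1 in one divmod loop and returns (n_leaves-1-digitsum)//(fanin-1) + numdigits, using the telescoping identity for sums of floor(m/fanin**j).
import Mathlib
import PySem

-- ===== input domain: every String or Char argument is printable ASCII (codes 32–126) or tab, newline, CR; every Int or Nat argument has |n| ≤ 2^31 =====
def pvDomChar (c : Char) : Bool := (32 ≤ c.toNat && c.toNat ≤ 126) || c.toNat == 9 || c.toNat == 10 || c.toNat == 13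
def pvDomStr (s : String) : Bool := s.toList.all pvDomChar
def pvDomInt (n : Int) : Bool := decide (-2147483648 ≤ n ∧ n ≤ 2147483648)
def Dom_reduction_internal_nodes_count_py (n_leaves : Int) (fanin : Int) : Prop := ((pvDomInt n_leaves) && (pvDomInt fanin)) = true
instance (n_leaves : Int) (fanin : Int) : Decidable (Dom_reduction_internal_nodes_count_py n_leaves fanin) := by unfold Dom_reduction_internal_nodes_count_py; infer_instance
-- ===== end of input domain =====

-- B computes the answer in closed form from the base-fanin digits of n_leaves-1 instead of
-- summing successive ceiling-divided level sizes; same exact result (alternative).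

-- ===== PORT A =====
-- while n > 1: n = (n + fanin - 1) // fanin; total += n
-- (fuel is a totality guard only; n_leaves.toNat steps always suffice under Pre_)
def pvALoop (fanin : Int) : Nat → Int → Int → Int
  | 0, _, total => total
  | Nat.succ fuel, n, total =>
      if 1 < n then
        let n' := PySem.Int.floordiv (n + fanin - 1) fanin
        pvALoop fanin fuel n' (total + n')
      else total

def reduction_internal_nodes_count_py (n_leaves : Int) (fanin : Int) : Int :=
  if n_leaves ≤ 1 then 0 else pvALoop fanin n_leaves.toNat n_leaves 0

-- ===== PORT B =====
-- while m > 0: m, d = divmod(m, fanin); digit_sum += d; n_digits += 1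
-- (fuel is a totality guard only; (n_leaves-1).toNat steps always suffice under Pre_)
def pvDigitLoop (fanin : Int) : Nat → Int → Int → Int → Int × Int
  | 0, _, s, c => (s, c)
  | Nat.succ fuel, m, s, c =>
      if 0 < m then
        pvDigitLoop fanin fuel (PySem.Int.floordiv m fanin) (s + PySem.Int.mod m fanin) (c + 1)
      else (s, c)

def reduction_internal_nodes_count_py_alt (n_leaves : Int) (fanin : Int) : Int :=
  if n_leaves ≤ 1 then 0
  else
    let p := pvDigitLoop fanin (n_leaves - 1).toNat (n_leaves - 1) 0 0
    PySem.Int.floordiv (n_leaves - 1 - p.1) (fanin - 1) + p.2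

-- ===== PRECONDITION & SPEC =====
-- Python A asserts fanin >= 2 (AssertionError otherwise), so only fanin ≥ 2 is admitted.
def Pre_reduction_internal_nodes_count_py (n_leaves : Int) (fanin : Int) : Prop := 2 ≤ fanin
instance (n_leaves : Int) (fanin : Int) : Decidable (Pre_reduction_internal_nodes_count_py n_leaves fanin) := by unfold Pre_reduction_internal_nodes_count_py; infer_instance
def pvWitness_reduction_internal_nodes_count_py : Int × Int := (1001, 1000)

def Spec_reduction_internal_nodes_count_py (n_leaves : Int) (fanin : Int) (out : Int) : Prop := out = reduction_internal_nodes_count_py_alt n_leaves fanin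
instance (n_leaves : Int) (fanin : Int) (out : Int) : Decidable (Spec_reduction_internal_nodes_count_py n_leaves fanin out) := by unfold Spec_reduction_internal_nodes_count_py; infer_instance

-- ===== CLAIM (what is proved, stated in full; the proofs are below) =====
def Claim_equal_reduction_internal_nodes_count_py : Prop := ∀ (n_leaves : Int) (fanin : Int), Dom_reduction_internal_nodes_count_py n_leaves fanin → Pre_reduction_internal_nodes_count_py n_leaves fanin → Spec_reduction_internal_nodes_count_py n_leaves fanin (reduction_internal_nodes_count_py n_leaves fanin)

-- ===== LEMMAS AND PROOFS =====

-- A's loop is done once the running value is ≤ 1, whatever the fuel.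
theorem pvALoopDone (fanin : Int) (fuel : Nat) (n total : Int) (h : ¬ 1 < n) :
    pvALoop fanin fuel n total = total := by
  cases fuel with
  | zero => rfl
  | succ fuel => simp [pvALoop, h]

-- B's digit loop is done once m ≤ 0, whatever the fuel.
theorem pvDigitDone (fanin : Int) (fuel : Nat) (m s c : Int) (h : ¬ 0 < m) :
    pvDigitLoop fanin fuel m s c = (s, c) := by
  cases fuel with
  | zero => rfl
  | succ fuel => simp [pvDigitLoop, h]

-- accumulator shift for the digit loop
theorem pvDigitShift (fanin : Int) (fuel : Nat) :
    ∀ m s c, pvDigitLoop fanin fuel m s c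
      = (s + (pvDigitLoop fanin fuel m 0 0).1, c + (pvDigitLoop fanin fuel m 0 0).2) := by
  induction fuel with
  | zero => intro m s c; simp [pvDigitLoop]
  | succ fuel ih =>
      intro m s c
      by_cases h : 0 < m
      · simp only [pvDigitLoop, if_pos h]
        rw [ih (PySem.Int.floordiv m fanin) (s + PySem.Int.mod m fanin) (c + 1),
            ih (PySem.Int.floordiv m fanin) (0 + PySem.Int.mod m fanin) (0 + 1)]
        simp only [Prod.mk.injEq]; constructor <;> ring
      · simp [pvDigitLoop, h]

-- Main invariant: for m ≥ 1 and enough fuel on both sides, A's loop starting at m+1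
-- equals the digit closed form of m.
theorem pvMain (fanin : Int) (hf : 2 ≤ fanin) :
    ∀ N m, m.toNat ≤ N → 1 ≤ m → ∀ (fa fd : Nat) (t : Int), m.toNat ≤ fa → m.toNat ≤ fd →
      pvALoop fanin fa (m + 1) t
        = t + PySem.Int.floordiv (m - (pvDigitLoop fanin fd m 0 0).1) (fanin - 1)
            + (pvDigitLoop fanin fd m 0 0).2 := by
  intro N
  induction N with
  | zero => intro m hN hm; omega
  | succ N ih =>
      intro m hN hm fa fd t hfa hfd
      set q := PySem.Int.floordiv m fanin with hq
      set d := PySem.Int.mod m fanin with hd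
      clear_value q d
      have hfpos : (0 : Int) < fanin := by omega
      have hqe : q = m / fanin := by rw [hq, PySem.Int.floordiv_eq_ediv_of_pos hfpos]
      have hde : d = m % fanin := by rw [hd, PySem.Int.mod_eq_emod_of_pos hfpos]
      have hsplit : fanin * q + d = m := by rw [hqe, hde]; exact Int.ediv_add_emod m fanin
      have hd0 : 0 ≤ d := by rw [hde]; exact Int.emod_nonneg m (by omega)
      have hdlt : d < fanin := by rw [hde]; exact Int.emod_lt_of_pos m hfpos
      have hq0 : 0 ≤ q := by rw [hqe]; exact Int.ediv_nonneg (by omega) (by omega)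
      have hqlt : q < m := by nlinarith
      obtain ⟨fa', rfl⟩ : ∃ fa', fa = fa' + 1 := ⟨fa - 1, by omega⟩
      obtain ⟨fd', rfl⟩ : ∃ fd', fd = fd' + 1 := ⟨fd - 1, by omega⟩
      -- one step of A's loop: ceil((m+1)/fanin) = q + 1
      have hstepA : PySem.Int.floordiv (m + 1 + fanin - 1) fanin = q + 1 := by
        rw [PySem.Int.floordiv_eq_ediv_of_pos hfpos]
        have : m + 1 + fanin - 1 = m + 1 * fanin := by ring
        rw [this, Int.add_mul_ediv_right m 1 (by omega : fanin ≠ 0), hqe]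
      rw [pvALoop, if_pos (by omega : (1:Int) < m + 1)]
      simp only [hstepA]
      -- one step of B's digit loop, then shift the accumulators out
      have hstepD : pvDigitLoop fanin (fd' + 1) m 0 0
          = (d + (pvDigitLoop fanin fd' q 0 0).1, 1 + (pvDigitLoop fanin fd' q 0 0).2) := by
        rw [pvDigitLoop]
        rw [if_pos (by omega : (0:Int) < m)]
        rw [pvDigitShift fanin fd' (PySem.Int.floordiv m fanin) (0 + PySem.Int.mod m fanin) (0 + 1)]
        rw [← hq, ← hd]
        simp only [Prod.mk.injEq]; constructor <;> ring
      rw [hstepD]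
      set S := (pvDigitLoop fanin fd' q 0 0).1 with hS
      set C := (pvDigitLoop fanin fd' q 0 0).2 with hC
      by_cases hq1 : 1 ≤ q
      · -- recursive case: IH at q
        have hqm : q.toNat < m.toNat := by omega
        have hrec := ih q (by omega) hq1 fa' fd' (t + (q + 1)) (by omega) (by omega)
        rw [hrec, ← hS, ← hC]
        -- arithmetic: q + 1 + (q - S)/(fanin-1) + C = ((m - (d + S))/(fanin-1)) + (1 + C)
        have hmd : m - (d + S) = (q - S) + q * (fanin - 1) := by
          have : m - d = fanin * q := by omega
          nlinarith [this]
        rw [PySem.Int.floordiv_eq_ediv_of_pos (by omega : (0:Int) < fanin - 1),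
            PySem.Int.floordiv_eq_ediv_of_pos (by omega : (0:Int) < fanin - 1), hmd,
            Int.add_mul_ediv_right (q - S) q (by omega : fanin - 1 ≠ 0)]
        ring
      · -- base case: q = 0, so d = m, the root level is reached
        have hq0' : q = 0 := by omega
        have hdm : d = m := by
          have h := hsplit; rw [hq0'] at h; simpa using h
        rw [pvDigitDone fanin fd' q 0 0 (by omega)] at hS hC
        rw [pvALoopDone fanin fa' (q + 1) (t + (q + 1)) (by omega)]
        simp only [hS, hC, hq0', hdm]
        have : m - (m + 0) = 0 := by ring
        rw [this]
        have hz : PySem.Int.floordiv 0 (fanin - 1) = 0 := by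
          rw [PySem.Int.floordiv_eq_ediv_of_pos (by omega : (0:Int) < fanin - 1)]; simp
        rw [hz]; ring

-- ===== VERDICT (by name: the statement is the Claim_ definition above) =====
theorem reduction_internal_nodes_count_py_spec : Claim_equal_reduction_internal_nodes_count_py := by
  unfold Claim_equal_reduction_internal_nodes_count_py
  intro n_leaves fanin _ hpre
  unfold Pre_reduction_internal_nodes_count_py at hpre
  unfold Spec_reduction_internal_nodes_count_py
  unfold reduction_internal_nodes_count_py reduction_internal_nodes_count_py_alt
  by_cases hle : n_leaves ≤ 1
  · rw [if_pos hle, if_pos hle]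
  · rw [if_neg hle, if_neg hle]
    push_neg at hle
    have hrw : n_leaves = (n_leaves - 1) + 1 := by ring
    have := pvMain fanin hpre (n_leaves - 1).toNat (n_leaves - 1) (le_refl _) (by omega)
      n_leaves.toNat (n_leaves - 1).toNat 0 (by omega) (le_refl _)
    rw [← hrw] at this
    rw [this]
    ring
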